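-- pv_equiv track=rewrite | github.com/BSquare-Ai/AURAMED-2D | src/utils/label_extraction.py | get_body_region_from_labels
-- ===== SOURCE A (Python) =====
-- from typing import List, Dict, Set
--
-- def get_body_region_from_labels(labels: List[str]) -> str:
--     """
--     Determine body region from anatomical labels.
--
--     Args:
--         labels: List of anatomical labels
--
--     Returns:
--         Detected body region (chest, abdomen, pelvis, head, extremity, or unknown)
--     """
--     labels_lower = [label.lower() for label in labels]
--
--     region_keywords = {
--         'chest': ['lung', 'heart', 'rib', 'chest', 'thorax'],
--         'abdomen': ['liver', 'spleen', 'kidney', 'pancreas', 'stomach'],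
--         'pelvis': ['pelvis', 'bladder', 'uterus', 'prostate'],
--         'head': ['brain', 'skull', 'head'],
--         'extremity': ['knee', 'hip', 'wrist', 'shoulder', 'ankle', 'elbow']
--     }
--
--     for region, keywords in region_keywords.items():
--         if any(keyword in label for label in labels_lower for keyword in keywords):
--             return region
--
--     return 'unknown'
-- ===== SOURCE B (Python) =====
-- def get_body_region_from_labels(labels):
--     """
--     Determine body region from anatomical labels.
--
--     Single pass over the labels: each region has a priority index (chest=0,
--     abdomen=1, pelvis=2, head=3, extremity=4); for each label record the
--     lowest-priority region whose keywords hit, then return the best region.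
--     """
--     regions = [
--         ('chest', ['lung', 'heart', 'rib', 'chest', 'thorax']),
--         ('abdomen', ['liver', 'spleen', 'kidney', 'pancreas', 'stomach']),
--         ('pelvis', ['pelvis', 'bladder', 'uterus', 'prostate']),
--         ('head', ['brain', 'skull', 'head']),
--         ('extremity', ['knee', 'hip', 'wrist', 'shoulder', 'ankle', 'elbow']),
--     ]
--     best = len(regions)
--     for label in labels:
--         low = label.lower()
--         for i, (_, kws) in enumerate(regions):
--             if i < best and any(k in low for k in kws):
--                 best = i
--                 break
--     return regions[best][0] if best < len(regions) else 'unknown'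
-- ===== Notes on version B (the rewrite author's own statement) =====
-- stated objective: alternative
-- what changed: Replaces A's region-by-region short-circuit scan over all labels with a single pass over the labels that records the minimum region-priority index hit, selecting the best region at the end.
import Mathlib
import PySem

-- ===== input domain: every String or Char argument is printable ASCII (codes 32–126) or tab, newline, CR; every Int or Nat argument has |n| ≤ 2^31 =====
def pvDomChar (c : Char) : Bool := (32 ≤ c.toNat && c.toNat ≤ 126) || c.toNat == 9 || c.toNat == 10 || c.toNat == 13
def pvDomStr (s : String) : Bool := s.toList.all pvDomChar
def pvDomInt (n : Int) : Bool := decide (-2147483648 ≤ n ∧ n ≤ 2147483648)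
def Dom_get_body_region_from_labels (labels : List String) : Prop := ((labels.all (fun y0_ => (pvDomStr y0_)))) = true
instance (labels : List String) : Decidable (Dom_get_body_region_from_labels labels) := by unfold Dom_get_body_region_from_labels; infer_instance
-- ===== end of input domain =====

-- B replaces A's region-by-region short-circuit scan with one pass over the labels that
-- records the minimum region-priority index hit (alternative decomposition, same cost).

-- shared literal keyword lists (the same data appears in both Pythons)
def kwChest : List String := ["lung", "heart", "rib", "chest", "thorax"]
def kwAbdomen : List String := ["liver", "spleen", "kidney", "pancreas", "stomach"]
def kwPelvis : List String := ["pelvis", "bladder", "uterus", "prostate"]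
def kwHead : List String := ["brain", "skull", "head"]
def kwExtremity : List String := ["knee", "hip", "wrist", "shoulder", "ankle", "elbow"]

-- ===== PORT A =====
def aRegionKeywords : List (String × List String) :=
  [("chest", kwChest), ("abdomen", kwAbdomen), ("pelvis", kwPelvis),
   ("head", kwHead), ("extremity", kwExtremity)]

def aRegionLoop (labels_lower : List String) : List (String × List String) → String
  | [] => "unknown"
  | (region, keywords) :: rest =>
    if labels_lower.any (fun label => keywords.any (fun keyword => PySem.Str.isIn keyword label)) then
      region
    else aRegionLoop labels_lower rest

def get_body_region_from_labels (labels : List String) : String :=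
  aRegionLoop (labels.map PySem.Str.lower) aRegionKeywords

-- ===== PORT B =====
def bRegions : List (String × List String) :=
  [("chest", kwChest), ("abdomen", kwAbdomen), ("pelvis", kwPelvis),
   ("head", kwHead), ("extremity", kwExtremity)]

def bHit (low : String) (kws : List String) : Bool :=
  kws.any (fun k => PySem.Str.isIn k low)

-- inner loop of B: first region index i < best whose keywords hit, else best
def bScan (low : String) (best : Nat) : Nat → List (String × List String) → Nat
  | _, [] => best
  | i, (_, kws) :: rest =>
    if i < best && bHit low kws then i else bScan low best (i + 1) rest

def get_body_region_from_labels_alt (labels : List String) : String :=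
  let best := labels.foldl (fun best label => bScan (PySem.Str.lower label) best 0 bRegions) 5
  if best < 5 then (bRegions.getD best ("unknown", [])).1 else "unknown"

-- ===== PRECONDITION & SPEC =====
def Spec_get_body_region_from_labels (labels : List String) (out : String) : Prop := out = get_body_region_from_labels_alt labels
instance (labels : List String) (out : String) : Decidable (Spec_get_body_region_from_labels labels out) := by unfold Spec_get_body_region_from_labels; infer_instance

-- ===== CLAIM (what is proved, stated in full; the proofs are below) =====
def Claim_equal_get_body_region_from_labels : Prop := ∀ (labels : List String), Dom_get_body_region_from_labels labels → Spec_get_body_region_from_labels labels (get_body_region_from_labels labels)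

-- ===== LEMMAS AND PROOFS =====

-- priority index of the first 'true' among five flags (5 = none)
def fh5 (a b c d e : Bool) : Nat :=
  if a then 0 else if b then 1 else if c then 2 else if d then 3 else if e then 4 else 5

lemma fh5_le_five (a b c d e : Bool) : fh5 a b c d e ≤ 5 := by
  cases a <;> cases b <;> cases c <;> cases d <;> cases e <;> decide

lemma fh5_or (a b c d e a' b' c' d' e' : Bool) :
    fh5 (a || a') (b || b') (c || c') (d || d') (e || e')
      = min (fh5 a b c d e) (fh5 a' b' c' d' e') := by
  cases a <;> cases b <;> cases c <;> cases d <;> cases e <;>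
    cases a' <;> cases b' <;> cases c' <;> cases d' <;> cases e' <;> decide

-- does any label hit the keyword list?
def anyHit (labels : List String) (kws : List String) : Bool :=
  labels.any (fun l => bHit (PySem.Str.lower l) kws)

def idxOf (labels : List String) : Nat :=
  fh5 (anyHit labels kwChest) (anyHit labels kwAbdomen) (anyHit labels kwPelvis)
      (anyHit labels kwHead) (anyHit labels kwExtremity)

lemma bScan_eq (low : String) (best : Nat) (hb : best ≤ 5) :
    bScan low best 0 bRegions
      = min (fh5 (bHit low kwChest) (bHit low kwAbdomen) (bHit low kwPelvis)
                 (bHit low kwHead) (bHit low kwExtremity)) best := by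
  simp only [bRegions, bScan, fh5]
  cases bHit low kwChest <;> cases bHit low kwAbdomen <;> cases bHit low kwPelvis <;>
    cases bHit low kwHead <;> cases bHit low kwExtremity <;> simp <;>
    first
    | (split_ifs <;> omega)
    | omega

lemma foldl_bScan_eq (labels : List String) :
    ∀ best : Nat, best ≤ 5 →
      labels.foldl (fun b label => bScan (PySem.Str.lower label) b 0 bRegions) best
        = min (idxOf labels) best := by
  induction labels with
  | nil =>
    intro best hb
    simp [idxOf, anyHit, fh5]
    omega
  | cons l ls ih =>
    intro best hb
    have h1 : bScan (PySem.Str.lower l) best 0 bRegions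
        = min (fh5 (bHit (PySem.Str.lower l) kwChest) (bHit (PySem.Str.lower l) kwAbdomen)
                   (bHit (PySem.Str.lower l) kwPelvis) (bHit (PySem.Str.lower l) kwHead)
                   (bHit (PySem.Str.lower l) kwExtremity)) best := bScan_eq _ _ hb
    have h2 : idxOf (l :: ls)
        = min (fh5 (bHit (PySem.Str.lower l) kwChest) (bHit (PySem.Str.lower l) kwAbdomen)
                   (bHit (PySem.Str.lower l) kwPelvis) (bHit (PySem.Str.lower l) kwHead)
                   (bHit (PySem.Str.lower l) kwExtremity)) (idxOf ls) := by
      simp only [idxOf, anyHit, List.any_cons]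
      rw [fh5_or]
    have hfle := fh5_le_five (bHit (PySem.Str.lower l) kwChest) (bHit (PySem.Str.lower l) kwAbdomen)
        (bHit (PySem.Str.lower l) kwPelvis) (bHit (PySem.Str.lower l) kwHead)
        (bHit (PySem.Str.lower l) kwExtremity)
    rw [List.foldl_cons, h1, ih _ (by omega), h2]
    omega

-- the name-selection step of both sides agrees, for every flag combination
lemma chain_eq_select (a b c d e : Bool) :
    (if a then "chest" else if b then "abdomen" else if c then "pelvis"
     else if d then "head" else if e then "extremity" else "unknown")
      = (if fh5 a b c d e < 5 then (bRegions.getD (fh5 a b c d e) ("unknown", [])).1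
         else "unknown") := by
  cases a <;> cases b <;> cases c <;> cases d <;> cases e <;> decide

lemma aLoop_eq_chain (labels : List String) :
    aRegionLoop (labels.map PySem.Str.lower) aRegionKeywords
      = (if anyHit labels kwChest then "chest" else if anyHit labels kwAbdomen then "abdomen"
         else if anyHit labels kwPelvis then "pelvis" else if anyHit labels kwHead then "head"
         else if anyHit labels kwExtremity then "extremity" else "unknown") := by
  simp only [aRegionKeywords, aRegionLoop, anyHit, bHit, List.any_map, Function.comp_def]
  rfl

-- ===== VERDICT (by name: the statement is the Claim_ definition above) =====
theorem get_body_region_from_labels_spec : Claim_equal_get_body_region_from_labels := by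
  intro labels _
  show get_body_region_from_labels labels = get_body_region_from_labels_alt labels
  rw [get_body_region_from_labels, aLoop_eq_chain, chain_eq_select]
  rw [get_body_region_from_labels_alt]
  rw [foldl_bScan_eq labels 5 (le_refl 5)]
  rw [Nat.min_eq_left (by
    simpa [idxOf] using fh5_le_five (anyHit labels kwChest) (anyHit labels kwAbdomen)
      (anyHit labels kwPelvis) (anyHit labels kwHead) (anyHit labels kwExtremity))]
  rfl
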